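-- pv_equiv track=rewrite | github.com/srujan1466/ESP_MESH_MONITORING_NETWORK | server/app.py | classify_zone
-- ===== SOURCE A (Python) =====
-- THRESHOLDS = {
--     'air_quality': {
--         'green': (0, 50),       # Good
--         'yellow': (50, 100),    # Moderate
--         'orange': (100, 200),   # Unhealthy for sensitive
--         'red': (200, 5000),     # Hazardous
--     },
--     'noise': {
--         'green': (0, 55),       # Acceptable
--         'yellow': (55, 70),     # Moderate
--         'orange': (70, 85),     # Loud
--         'red': (85, 140),       # Dangerous
--     },
--     'temperature': {
--         'green': (15, 30),
--         'yellow': (30, 40),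
--         'orange': (40, 50),
--         'red': (50, 100),
--     }
-- }
--
-- def classify_zone(air_ppm, noise_db, temperature):
--     """Determine overall zone based on worst metric."""
--     zones = []
--
--     for metric, value in [('air_quality', air_ppm), ('noise', noise_db), ('temperature', temperature)]:
--         if value is None or value < -900:
--             continue
--         thresholds = THRESHOLDS[metric]
--         zone = 'green'
--         for z in ['red', 'orange', 'yellow', 'green']:
--             low, high = thresholds[z]
--             if low <= value < high:
--                 zone = z
--                 break
--             elif value >= thresholds['red'][0]:
--                 zone = 'red'
--                 break
--         zones.append(zone)
--
--     if not zones: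
--         return 'green'
--
--     priority = {'red': 4, 'orange': 3, 'yellow': 2, 'green': 1}
--     worst = max(zones, key=lambda z: priority.get(z, 0))
--     return worst
-- ===== SOURCE B (Python) =====
-- # B: severity-major top-down scan (red -> orange -> yellow) with early return,
-- # replacing A's build-zones-list-then-max-by-priority pass. Objective: simpler decomposition.
--
-- THRESHOLDS = {
--     'air_quality': {
--         'green': (0, 50),
--         'yellow': (50, 100),
--         'orange': (100, 200),
--         'red': (200, 5000),
--     },
--     'noise': {
--         'green': (0, 55),
--         'yellow': (55, 70),
--         'orange': (70, 85),
--         'red': (85, 140),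
--     },
--     'temperature': {
--         'green': (15, 30),
--         'yellow': (30, 40),
--         'orange': (40, 50),
--         'red': (50, 100),
--     }
-- }
--
--
-- def _hit(sev, metric, value):
--     low, high = THRESHOLDS[metric][sev]
--     if sev == 'red':
--         return value >= low
--     return low <= value < high
--
--
-- def classify_zone(air_ppm, noise_db, temperature):
--     """Determine overall zone based on worst metric."""
--     present = [(m, v) for m, v in
--                [('air_quality', air_ppm), ('noise', noise_db), ('temperature', temperature)]
--                if v is not None and v >= -900]
--     for sev in ('red', 'orange', 'yellow'):
--         if any(_hit(sev, m, v) for m, v in present):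
--             return sev
--     return 'green'
-- ===== Notes on version B (the rewrite author's own statement) =====
-- stated objective: simpler
-- what changed: Replaces A's metric-major pass (per-metric zone computed via an inner break-loop, collected into a list, then max by a priority dict) with a severity-major top-down scan that returns the first severity (red, orange, yellow) any present reading hits, defaulting to green; the zones list and priority dict disappear.
import Mathlib
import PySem

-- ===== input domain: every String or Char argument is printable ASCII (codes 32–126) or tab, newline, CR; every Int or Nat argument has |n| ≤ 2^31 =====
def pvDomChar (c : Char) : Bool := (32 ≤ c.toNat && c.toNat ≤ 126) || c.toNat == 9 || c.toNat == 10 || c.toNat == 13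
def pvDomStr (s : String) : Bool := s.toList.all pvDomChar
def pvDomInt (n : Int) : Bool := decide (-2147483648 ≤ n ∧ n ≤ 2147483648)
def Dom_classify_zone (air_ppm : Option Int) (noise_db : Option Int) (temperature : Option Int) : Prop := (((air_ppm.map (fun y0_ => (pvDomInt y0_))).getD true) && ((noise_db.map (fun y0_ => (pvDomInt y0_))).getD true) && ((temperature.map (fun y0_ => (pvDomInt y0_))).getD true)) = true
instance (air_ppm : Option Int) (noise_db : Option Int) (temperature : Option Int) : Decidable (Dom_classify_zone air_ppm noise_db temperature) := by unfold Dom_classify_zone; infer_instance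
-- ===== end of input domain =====

-- B replaces A's metric-major zones-list-then-max pass by a severity-major top-down
-- scan with early return; objective: simpler (no zones list, no priority dict).

-- ===== PORT A =====
def pyTHRESHOLDS : PySem.Dict String (PySem.Dict String (Int × Int)) :=
  PySem.Dict.ofList [
    ("air_quality", PySem.Dict.ofList [("green", (0, 50)), ("yellow", (50, 100)), ("orange", (100, 200)), ("red", (200, 5000))]),
    ("noise", PySem.Dict.ofList [("green", (0, 55)), ("yellow", (55, 70)), ("orange", (70, 85)), ("red", (85, 140))]),
    ("temperature", PySem.Dict.ofList [("green", (15, 30)), ("yellow", (30, 40)), ("orange", (40, 50)), ("red", (50, 100))])]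

-- inner 'for z in [...]' loop with break; exiting the loop leaves zone = 'green'
def zoneLoopA (thr : PySem.Dict String (Int × Int)) (value : Int) : List String → String
  | [] => "green"
  | z :: rest =>
    let lh := thr.getD z (0, 0)
    if lh.1 ≤ value ∧ value < lh.2 then z
    else if value ≥ (thr.getD "red" (0, 0)).1 then "red"
    else zoneLoopA thr value rest

-- outer 'for metric, value in [...]' loop building the zones list
def zonesLoopA : List (String × Option Int) → List String
  | [] => []
  | (metric, value) :: rest =>
    match value with
    | none => zonesLoopA rest
    | some v =>
      if v < -900 then zonesLoopA rest
      else
        let thr := pyTHRESHOLDS.getD metric PySem.Dict.empty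
        zoneLoopA thr v ["red", "orange", "yellow", "green"] :: zonesLoopA rest

def pyPriority : PySem.Dict String Int :=
  PySem.Dict.ofList [("red", 4), ("orange", 3), ("yellow", 2), ("green", 1)]

def classify_zone (air_ppm : Option Int) (noise_db : Option Int) (temperature : Option Int) : String :=
  let zones := zonesLoopA [("air_quality", air_ppm), ("noise", noise_db), ("temperature", temperature)]
  match PySem.List.max? zones (fun z => pyPriority.getD z 0) with
  | none => "green"          -- 'if not zones: return green'
  | some worst => worst

-- ===== PORT B =====
def THRESHOLDS_B : PySem.Dict String (PySem.Dict String (Int × Int)) :=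
  PySem.Dict.ofList [
    ("air_quality", PySem.Dict.ofList [("green", (0, 50)), ("yellow", (50, 100)), ("orange", (100, 200)), ("red", (200, 5000))]),
    ("noise", PySem.Dict.ofList [("green", (0, 55)), ("yellow", (55, 70)), ("orange", (70, 85)), ("red", (85, 140))]),
    ("temperature", PySem.Dict.ofList [("green", (15, 30)), ("yellow", (30, 40)), ("orange", (40, 50)), ("red", (50, 100))])]

def hitB (sev : String) (metric : String) (value : Int) : Bool :=
  let lh := (THRESHOLDS_B.getD metric PySem.Dict.empty).getD sev (0, 0)
  if sev = "red" then decide (value ≥ lh.1)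
  else decide (lh.1 ≤ value ∧ value < lh.2)

-- 'for sev in (...): if any(...): return sev' / fall-through 'green'
def sevLoopB (present : List (String × Int)) : List String → String
  | [] => "green"
  | sev :: rest => if present.any (fun p => hitB sev p.1 p.2) then sev else sevLoopB present rest

def classify_zone_alt (air_ppm : Option Int) (noise_db : Option Int) (temperature : Option Int) : String :=
  let present := ([("air_quality", air_ppm), ("noise", noise_db), ("temperature", temperature)] : List (String × Option Int)).filterMap
    (fun p => match p.2 with
      | none => none
      | some v => if v ≥ -900 then some (p.1, v) else none)
  sevLoopB present ["red", "orange", "yellow"]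

-- ===== PRECONDITION & SPEC =====
def Spec_classify_zone (air_ppm : Option Int) (noise_db : Option Int) (temperature : Option Int) (out : String) : Prop := out = classify_zone_alt air_ppm noise_db temperature
instance (air_ppm : Option Int) (noise_db : Option Int) (temperature : Option Int) (out : String) : Decidable (Spec_classify_zone air_ppm noise_db temperature out) := by unfold Spec_classify_zone; infer_instance

-- ===== CLAIM (what is proved, stated in full; the proofs are below) =====
def Claim_equal_classify_zone : Prop := ∀ (air_ppm : Option Int) (noise_db : Option Int) (temperature : Option Int), Dom_classify_zone air_ppm noise_db temperature → Spec_classify_zone air_ppm noise_db temperature (classify_zone air_ppm noise_db temperature)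

-- ===== LEMMAS AND PROOFS =====

-- per-metric characterization of A's inner loop
lemma zoneA_air (v : Int) : zoneLoopA (pyTHRESHOLDS.getD "air_quality" PySem.Dict.empty) v ["red","orange","yellow","green"] =
    (if 200 ≤ v then "red" else if 100 ≤ v then "orange" else if 50 ≤ v then "yellow" else "green") := by
  have h1 : (pyTHRESHOLDS.getD "air_quality" PySem.Dict.empty).getD "red" (0,0) = ((200:Int),(5000:Int)) := by decide
  have h2 : (pyTHRESHOLDS.getD "air_quality" PySem.Dict.empty).getD "orange" (0,0) = ((100:Int),(200:Int)) := by decide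
  have h3 : (pyTHRESHOLDS.getD "air_quality" PySem.Dict.empty).getD "yellow" (0,0) = ((50:Int),(100:Int)) := by decide
  have h4 : (pyTHRESHOLDS.getD "air_quality" PySem.Dict.empty).getD "green" (0,0) = ((0:Int),(50:Int)) := by decide
  simp only [zoneLoopA, h1, h2, h3, h4]
  split_ifs <;> first | rfl | omega

lemma zoneA_noise (v : Int) : zoneLoopA (pyTHRESHOLDS.getD "noise" PySem.Dict.empty) v ["red","orange","yellow","green"] =
    (if 85 ≤ v then "red" else if 70 ≤ v then "orange" else if 55 ≤ v then "yellow" else "green") := by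
  have h1 : (pyTHRESHOLDS.getD "noise" PySem.Dict.empty).getD "red" (0,0) = ((85:Int),(140:Int)) := by decide
  have h2 : (pyTHRESHOLDS.getD "noise" PySem.Dict.empty).getD "orange" (0,0) = ((70:Int),(85:Int)) := by decide
  have h3 : (pyTHRESHOLDS.getD "noise" PySem.Dict.empty).getD "yellow" (0,0) = ((55:Int),(70:Int)) := by decide
  have h4 : (pyTHRESHOLDS.getD "noise" PySem.Dict.empty).getD "green" (0,0) = ((0:Int),(55:Int)) := by decide
  simp only [zoneLoopA, h1, h2, h3, h4]
  split_ifs <;> first | rfl | omega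

lemma zoneA_temp (v : Int) : zoneLoopA (pyTHRESHOLDS.getD "temperature" PySem.Dict.empty) v ["red","orange","yellow","green"] =
    (if 50 ≤ v then "red" else if 40 ≤ v then "orange" else if 30 ≤ v then "yellow" else "green") := by
  have h1 : (pyTHRESHOLDS.getD "temperature" PySem.Dict.empty).getD "red" (0,0) = ((50:Int),(100:Int)) := by decide
  have h2 : (pyTHRESHOLDS.getD "temperature" PySem.Dict.empty).getD "orange" (0,0) = ((40:Int),(50:Int)) := by decide
  have h3 : (pyTHRESHOLDS.getD "temperature" PySem.Dict.empty).getD "yellow" (0,0) = ((30:Int),(40:Int)) := by decide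
  have h4 : (pyTHRESHOLDS.getD "temperature" PySem.Dict.empty).getD "green" (0,0) = ((15:Int),(30:Int)) := by decide
  simp only [zoneLoopA, h1, h2, h3, h4]
  split_ifs <;> first | rfl | omega

-- characterization of B's band test
lemma hitB_red_air (v : Int) : hitB "red" "air_quality" v = decide (200 ≤ v) := by
  have h : (THRESHOLDS_B.getD "air_quality" PySem.Dict.empty).getD "red" (0,0) = ((200:Int),(5000:Int)) := by decide
  simp [hitB, h]
lemma hitB_orange_air (v : Int) : hitB "orange" "air_quality" v = decide (100 ≤ v ∧ v < 200) := by
  have h : (THRESHOLDS_B.getD "air_quality" PySem.Dict.empty).getD "orange" (0,0) = ((100:Int),(200:Int)) := by decide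
  simp [hitB, h]
lemma hitB_yellow_air (v : Int) : hitB "yellow" "air_quality" v = decide (50 ≤ v ∧ v < 100) := by
  have h : (THRESHOLDS_B.getD "air_quality" PySem.Dict.empty).getD "yellow" (0,0) = ((50:Int),(100:Int)) := by decide
  simp [hitB, h]
lemma hitB_red_noise (v : Int) : hitB "red" "noise" v = decide (85 ≤ v) := by
  have h : (THRESHOLDS_B.getD "noise" PySem.Dict.empty).getD "red" (0,0) = ((85:Int),(140:Int)) := by decide
  simp [hitB, h]
lemma hitB_orange_noise (v : Int) : hitB "orange" "noise" v = decide (70 ≤ v ∧ v < 85) := by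
  have h : (THRESHOLDS_B.getD "noise" PySem.Dict.empty).getD "orange" (0,0) = ((70:Int),(85:Int)) := by decide
  simp [hitB, h]
lemma hitB_yellow_noise (v : Int) : hitB "yellow" "noise" v = decide (55 ≤ v ∧ v < 70) := by
  have h : (THRESHOLDS_B.getD "noise" PySem.Dict.empty).getD "yellow" (0,0) = ((55:Int),(70:Int)) := by decide
  simp [hitB, h]
lemma hitB_red_temp (v : Int) : hitB "red" "temperature" v = decide (50 ≤ v) := by
  have h : (THRESHOLDS_B.getD "temperature" PySem.Dict.empty).getD "red" (0,0) = ((50:Int),(100:Int)) := by decide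
  simp [hitB, h]
lemma hitB_orange_temp (v : Int) : hitB "orange" "temperature" v = decide (40 ≤ v ∧ v < 50) := by
  have h : (THRESHOLDS_B.getD "temperature" PySem.Dict.empty).getD "orange" (0,0) = ((40:Int),(50:Int)) := by decide
  simp [hitB, h]
lemma hitB_yellow_temp (v : Int) : hitB "yellow" "temperature" v = decide (30 ≤ v ∧ v < 40) := by
  have h : (THRESHOLDS_B.getD "temperature" PySem.Dict.empty).getD "yellow" (0,0) = ((30:Int),(40:Int)) := by decide
  simp [hitB, h]

@[simp] lemma neg900_bridge (v : Int) : (-900 ≤ v) ↔ ¬ (v < -900) := by omega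

-- ===== VERDICT (by name: the statement is the Claim_ definition above) =====
set_option maxHeartbeats 4000000 in
theorem classify_zone_spec : Claim_equal_classify_zone := by
  intro a n t _
  unfold Spec_classify_zone classify_zone classify_zone_alt
  cases a <;> cases n <;> cases t <;>
    simp only [zonesLoopA, List.filterMap_cons, List.filterMap_nil, zoneA_air, zoneA_noise,
      zoneA_temp, neg900_bridge] <;>
    (try split_ifs) <;>
    simp only [sevLoopB, List.any_cons, List.any_nil,
      hitB_red_air, hitB_orange_air, hitB_yellow_air,
      hitB_red_noise, hitB_orange_noise, hitB_yellow_noise,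
      hitB_red_temp, hitB_orange_temp, hitB_yellow_temp, Bool.or_false] <;>
    (try split_ifs) <;>
    first
      | rfl
      | (exfalso
         first
           | assumption
           | ((try simp only [Bool.or_eq_true, decide_eq_true_eq, Bool.false_eq_true] at *) <;> omega))
      | decide
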